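-- pv_equiv track=rewrite | github.com/francmatyas/uhk-thesis-automatic-kyc | worker/src/document/mrz_reader.py | clean_name
-- ===== SOURCE A (Python) =====
-- def clean_name(raw: str) -> str:
--     """
--     Odstraní OCR artefakty výplně z pole jména/příjmení.
--
--     MRZ výplňový znak '<' bývá po konci skutečného jména často chybně přečten
--     jako mezery nebo jednotlivá písmena (K, S, X, Z, I). Funkce ponechá
--     pouze tokeny s alespoň 2 písmeny a skončí na prvním krátkém/šumovém tokenu,
--     který následuje po validním jmenném tokenu.
--
--     Příklady:
--         "MATYAS        K  KKKKKKKKKKSKKKS"   → "MATYAS"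
--         "ANNA MARIA C"                       → "ANNA MARIA"
--         "ERIKSSON"                           → "ERIKSSON"
--     """
--     tokens = raw.split()
--     clean_tokens: list[str] = []
--     for t in tokens:
--         if len(t) >= 2 and t.isalpha():
--             clean_tokens.append(t)
--         elif clean_tokens:
--             break  # první šumový token po reálném obsahu = konec jména
--     return " ".join(clean_tokens)
-- ===== SOURCE B (Python) =====
-- from itertools import groupby
--
--
-- def _valid(t: str) -> bool:
--     return len(t) >= 2 and t.isalpha()
--
--
-- def clean_name(raw: str) -> str:
--     # Partition the token list into maximal runs of same validity,
--     # then return the first run consisting of valid tokens (or "").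
--     for is_valid, run in groupby(raw.split(), key=_valid):
--         if is_valid:
--             return " ".join(run)
--     return ""
-- ===== Notes on version B (the rewrite author's own statement) =====
-- stated objective: alternative
-- what changed: Replaces A's single accumulator loop with break by a run-partitioning approach: tokens are grouped into maximal runs of equal validity (itertools.groupby) and the first valid run is returned.
import Mathlib
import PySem

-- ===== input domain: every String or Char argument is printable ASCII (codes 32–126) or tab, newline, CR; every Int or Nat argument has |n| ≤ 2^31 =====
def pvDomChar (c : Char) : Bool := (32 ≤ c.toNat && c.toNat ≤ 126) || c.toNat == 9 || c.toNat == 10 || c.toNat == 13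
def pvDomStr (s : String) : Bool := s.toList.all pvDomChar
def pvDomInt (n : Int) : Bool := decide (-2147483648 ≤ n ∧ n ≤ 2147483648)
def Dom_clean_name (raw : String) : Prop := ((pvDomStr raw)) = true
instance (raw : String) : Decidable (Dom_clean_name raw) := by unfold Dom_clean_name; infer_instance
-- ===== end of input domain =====

-- B partitions the tokens into maximal runs of equal validity (groupby) and returns the
-- first valid run — an alternative decomposition of A's accumulator loop (same cost).

-- ===== PORT A =====
-- the loop: append valid tokens, break at the first invalid token once clean_tokens is nonempty
def pvCleanLoop : List String → List String → List String
  | [], acc => acc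
  | t :: ts, acc =>
    if 2 ≤ PySem.Str.len t && PySem.Str.strIsalpha t then
      pvCleanLoop ts (acc ++ [t])
    else if acc ≠ [] then acc
    else pvCleanLoop ts acc

def clean_name (raw : String) : String :=
  PySem.Str.join " " (pvCleanLoop (PySem.Str.split₀ raw) [])

-- ===== PORT B =====
def pvValid (t : String) : Bool := 2 ≤ PySem.Str.len t && PySem.Str.strIsalpha t

-- itertools.groupby with key = pvValid: maximal runs of tokens of equal validity
def pvGroups : List String → List (Bool × List String)
  | [] => []
  | t :: ts =>
    (pvValid t, t :: ts.takeWhile (fun u => pvValid u == pvValid t)) ::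
      pvGroups (ts.dropWhile (fun u => pvValid u == pvValid t))
  termination_by ts => ts.length
  decreasing_by
    exact Nat.lt_succ_of_le (List.length_dropWhile_le _ _)

-- the for-loop of Source B: return the join of the first valid run, else ""
def pvFirstValidRun : List (Bool × List String) → String
  | [] => ""
  | (b, g) :: rest => if b then PySem.Str.join " " g else pvFirstValidRun rest

def clean_name_alt (raw : String) : String :=
  pvFirstValidRun (pvGroups (PySem.Str.split₀ raw))

-- ===== PRECONDITION & SPEC =====
def Spec_clean_name (raw : String) (out : String) : Prop := out = clean_name_alt raw
instance (raw : String) (out : String) : Decidable (Spec_clean_name raw out) := by unfold Spec_clean_name; infer_instance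

-- ===== CLAIM (what is proved, stated in full; the proofs are below) =====
def Claim_equal_clean_name : Prop := ∀ (raw : String), Dom_clean_name raw → Spec_clean_name raw (clean_name raw)

-- ===== LEMMAS AND PROOFS =====
lemma pvTakeWhile_ext {α : Type} (p q : α → Bool) (l : List α)
    (h : ∀ a ∈ l, p a = q a) : l.takeWhile p = l.takeWhile q := by
  induction l with
  | nil => rfl
  | cons a l ih =>
    simp only [List.takeWhile_cons, h a (by simp)]
    cases q a with
    | true => simp [ih (fun a ha => h a (by simp [ha]))]
    | false => rfl

lemma pvDropWhile_ext {α : Type} (p q : α → Bool) (l : List α)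
    (h : ∀ a ∈ l, p a = q a) : l.dropWhile p = l.dropWhile q := by
  induction l with
  | nil => rfl
  | cons a l ih =>
    simp only [List.dropWhile_cons, h a (by simp)]
    cases q a with
    | true => simp [ih (fun a ha => h a (by simp [ha]))]
    | false => rfl

lemma pvCleanLoop_ne_nil (ts : List String) (acc : List String) (h : acc ≠ []) :
    pvCleanLoop ts acc = acc ++ ts.takeWhile pvValid := by
  induction ts generalizing acc with
  | nil => simp [pvCleanLoop]
  | cons t ts ih =>
    have hc : ((2 ≤ PySem.Str.len t && PySem.Str.strIsalpha t) : Bool) = pvValid t := rfl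
    rw [pvCleanLoop, hc]
    cases hv : pvValid t with
    | true =>
      rw [if_pos rfl, ih (acc ++ [t]) (by simp),
        List.takeWhile_cons_of_pos hv, List.append_assoc]
      rfl
    | false =>
      rw [if_neg (by simp), if_pos h, List.takeWhile_cons_of_neg (by simp [hv]),
        List.append_nil]

lemma pvFirstValidRun_groups (ts : List String) :
    pvFirstValidRun (pvGroups ts) =
      PySem.Str.join " " ((ts.dropWhile (fun t => !pvValid t)).takeWhile pvValid) := by
  induction hn : ts.length using Nat.strong_induction_on generalizing ts with
  | _ n ih =>
    cases ts with
    | nil => simp [pvGroups, pvFirstValidRun, PySem.Str.join]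
    | cons t ts =>
      rw [pvGroups]
      cases hv : pvValid t with
      | true =>
        rw [pvFirstValidRun, if_pos rfl,
          List.dropWhile_cons_of_neg (by simp [hv]),
          List.takeWhile_cons_of_pos hv]
        congr 2
        exact pvTakeWhile_ext _ _ ts (fun u _ => by cases pvValid u <;> simp)
      | false =>
        rw [pvFirstValidRun, if_neg (by simp),
          List.dropWhile_cons_of_pos (by simp [hv])]
        have hpred : ts.dropWhile (fun u => pvValid u == false)
            = ts.dropWhile (fun u => !pvValid u) :=
          pvDropWhile_ext _ _ ts (fun u _ => by cases pvValid u <;> simp)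
        rw [hpred, ih (ts.dropWhile (fun u => !pvValid u)).length
          (by
            subst hn
            exact Nat.lt_succ_of_le (List.length_dropWhile_le _ _)) _ rfl]
        congr 1
        have : ∀ l : List String,
            (l.dropWhile (fun u => !pvValid u)).dropWhile (fun u => !pvValid u)
              = l.dropWhile (fun u => !pvValid u) := by
          intro l
          cases hd : l.dropWhile (fun u => !pvValid u) with
          | nil => simp
          | cons x xs =>
            have hx : (!pvValid x) = false := by
              have := List.head_dropWhile_not (p := fun u => !pvValid u) (l := l)
                (by simp [hd])
              simpa [hd] using this
            rw [List.dropWhile_cons_of_neg (by simp [hx])]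
        rw [this]

-- ===== VERDICT (by name: the statement is the Claim_ definition above) =====
theorem clean_name_spec : Claim_equal_clean_name := by
  intro raw _
  unfold Spec_clean_name clean_name clean_name_alt
  rw [pvFirstValidRun_groups]
  cases h : (PySem.Str.split₀ raw) with
  | nil => simp [pvCleanLoop]
  | cons t ts =>
    rw [pvCleanLoop]
    have hc : ((2 ≤ PySem.Str.len t && PySem.Str.strIsalpha t) : Bool) = pvValid t := rfl
    rw [hc]
    cases hv : pvValid t with
    | true =>
      rw [if_pos rfl, List.nil_append, pvCleanLoop_ne_nil ts [t] (by simp),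
        List.dropWhile_cons_of_neg (by simp [hv]), List.takeWhile_cons_of_pos hv]
      rfl
    | false =>
      rw [if_neg (by simp), if_neg (by simp),
        List.dropWhile_cons_of_pos (by simp [hv])]
      -- remaining: loop on ts with empty acc = join of drop/take on ts
      clear h
      induction ts with
      | nil => simp [pvCleanLoop]
      | cons u us ihu =>
        rw [pvCleanLoop]
        have hcu : ((2 ≤ PySem.Str.len u && PySem.Str.strIsalpha u) : Bool) = pvValid u := rfl
        rw [hcu]
        cases hu : pvValid u with
        | true =>
          rw [if_pos rfl, List.nil_append, pvCleanLoop_ne_nil us [u] (by simp),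
            List.dropWhile_cons_of_neg (by simp [hu]), List.takeWhile_cons_of_pos hu]
          rfl
        | false =>
          rw [if_neg (by simp), if_neg (by simp), ihu,
            List.dropWhile_cons_of_pos (by simp [hu])]
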